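-- pv_equiv track=rewrite | github.com/keremidarski/python_playground | Python 101 Forever/C02 - Linux and Python Setup/c02p01_reduce_file_path.py | reduce_slashes
-- ===== SOURCE A (Python) =====
-- def reduce_slashes(groups):
--     result = []
--     slash_count = 0
--
--     for group in groups:
--
--         if len(group) == 1 and group[0] == '/':
--             if slash_count > 0:
--                 continue
--             else:
--                 slash_count += 1
--         else:
--             slash_count = 0
--
--         result.append(group)
--
--     return result
-- ===== SOURCE B (Python) =====
-- def reduce_slashes(groups):
--     def is_slash(g):
--         return len(g) == 1 and g[0] == '/'
--     result = []
--     i = 0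
--     n = len(groups)
--     while i < n:
--         j = i
--         while j < n and is_slash(groups[j]) == is_slash(groups[i]):
--             j += 1
--         if is_slash(groups[i]):
--             result.append(groups[i])
--         else:
--             result.extend(groups[i:j])
--         i = j
--     return result
-- ===== Notes on version B (the rewrite author's own statement) =====
-- stated objective: alternative
-- what changed: Replaces A's flag-based element-by-element pass with run-grouping: B finds each maximal run of equal slash/non-slash classification and collapses a slash-run to its first element while copying non-slash runs whole.
import Mathlib
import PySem

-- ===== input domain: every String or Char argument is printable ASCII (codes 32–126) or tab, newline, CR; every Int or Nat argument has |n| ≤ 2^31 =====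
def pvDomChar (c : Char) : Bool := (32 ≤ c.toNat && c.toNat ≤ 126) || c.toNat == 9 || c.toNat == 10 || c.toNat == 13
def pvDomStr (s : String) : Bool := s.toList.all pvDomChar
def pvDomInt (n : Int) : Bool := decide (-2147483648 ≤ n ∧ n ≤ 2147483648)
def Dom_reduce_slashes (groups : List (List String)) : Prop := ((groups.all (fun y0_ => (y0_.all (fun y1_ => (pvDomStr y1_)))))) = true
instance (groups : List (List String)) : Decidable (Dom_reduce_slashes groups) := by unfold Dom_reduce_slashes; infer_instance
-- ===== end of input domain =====

-- B is an alternative run-grouping formulation of the same O(n) collapse; return value only, no speed claim.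

-- ===== PORT A =====
-- the test `len(group) == 1 and group[0] == '/'` (shared by both Pythons; B names it is_slash)
def isSlash : List String → Bool
  | [s] => s == "/"
  | _ => false

-- A's loop body: state is (result, slash_count)
def stepA (st : List (List String) × Int) (group : List String) : List (List String) × Int :=
  if isSlash group then
    if st.2 > 0 then st
    else (st.1 ++ [group], st.2 + 1)
  else (st.1 ++ [group], 0)

def reduce_slashes (groups : List (List String)) : List (List String) :=
  (groups.foldl stepA ([], 0)).1

-- ===== PORT B =====
-- run-grouping: peel the maximal run with the same is_slash classification as the head
def reduce_slashes_alt : List (List String) → List (List String)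
  | [] => []
  | g :: rest =>
    let run := rest.takeWhile (fun h => isSlash h == isSlash g)
    let rest' := rest.dropWhile (fun h => isSlash h == isSlash g)
    (if isSlash g then [g] else g :: run) ++ reduce_slashes_alt rest'
termination_by l => l.length
decreasing_by
  simp only [List.length_cons]
  exact Nat.lt_succ_of_le (List.length_dropWhile_le _ _)

-- ===== PRECONDITION & SPEC =====
def Spec_reduce_slashes (groups : List (List String)) (out : List (List String)) : Prop := out = reduce_slashes_alt groups
instance (groups : List (List String)) (out : List (List String)) : Decidable (Spec_reduce_slashes groups out) := by unfold Spec_reduce_slashes; infer_instance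

-- ===== CLAIM (what is proved, stated in full; the proofs are below) =====
def Claim_equal_reduce_slashes : Prop := ∀ (groups : List (List String)), Dom_reduce_slashes groups → Spec_reduce_slashes groups (reduce_slashes groups)

-- ===== LEMMAS AND PROOFS =====

-- reference form of A's pass: prev = "was the previous group a slash group?"
def runA : List (List String) → Bool → List (List String)
  | [], _ => []
  | g :: rest, prev =>
    if isSlash g then
      if prev then runA rest true else g :: runA rest true
    else g :: runA rest false

lemma foldl_stepA (l : List (List String)) (res : List (List String)) (sc : Int)
    (hsc : 0 ≤ sc) :
    (l.foldl stepA (res, sc)).1 = res ++ runA l (decide (0 < sc)) := by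
  induction l generalizing res sc with
  | nil => simp [runA]
  | cons g rest ih =>
    rw [List.foldl_cons]
    by_cases hg : isSlash g
    · by_cases hpos : (0:Int) < sc
      · have hs : stepA (res, sc) g = (res, sc) := by simp [stepA, hg, hpos]
        rw [hs, ih res sc hsc, runA]
        simp [hg, hpos]
      · have hz : sc = 0 := le_antisymm (not_lt.mp hpos) hsc
        subst hz
        have hs : stepA (res, (0:Int)) g = (res ++ [g], 1) := by norm_num [stepA, hg]
        rw [hs, ih (res ++ [g]) 1 (by norm_num), runA]
        simp [hg]
    · have hs : stepA (res, sc) g = (res ++ [g], 0) := by simp [stepA, hg]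
      rw [hs, ih (res ++ [g]) 0 le_rfl, runA]
      simp [hg]

-- after a slash was just kept, further leading slashes are skipped
lemma runA_true (l : List (List String)) :
    runA l true = runA (l.dropWhile isSlash) false := by
  induction l with
  | nil => simp [runA]
  | cons g rest ih =>
    by_cases hg : isSlash g
    · simp [runA, hg, ih]
    · simp [runA, hg]

-- a non-slash prefix is copied verbatim
lemma runA_false_split (l : List (List String)) :
    runA l false =
      l.takeWhile (fun h => !isSlash h) ++ runA (l.dropWhile (fun h => !isSlash h)) false := by
  induction l with
  | nil => simp [runA]
  | cons g rest ih =>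
    by_cases hg : isSlash g
    · simp [hg]
    · simp [runA, hg, ih]

lemma runA_eq_alt (l : List (List String)) : runA l false = reduce_slashes_alt l := by
  induction l using reduce_slashes_alt.induct with
  | case1 => simp [runA, reduce_slashes_alt]
  | case2 g rest run ih =>
    have ih' : runA (List.dropWhile (fun h => isSlash h == isSlash g) rest) false
        = reduce_slashes_alt (List.dropWhile (fun h => isSlash h == isSlash g) rest) := ih
    rw [reduce_slashes_alt]
    by_cases hg : isSlash g
    · have hpred : (fun h => isSlash h == isSlash g) = isSlash := by
        funext h; simp [hg]
      rw [hpred] at ih'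
      simp only [runA, hg, if_true]
      rw [runA_true, ih']
      simp
    · have hpred : (fun h => isSlash h == isSlash g) = (fun h => !isSlash h) := by
        funext h; simp [hg]
      rw [hpred] at ih'
      simp only [runA, hg, Bool.false_eq_true, if_false]
      rw [runA_false_split rest, ih']
      simp

-- ===== VERDICT (by name: the statement is the Claim_ definition above) =====
theorem reduce_slashes_spec : Claim_equal_reduce_slashes := by
  intro groups _
  show reduce_slashes groups = reduce_slashes_alt groups
  rw [reduce_slashes, foldl_stepA groups [] 0 le_rfl, ← runA_eq_alt]
  simp
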